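-- pv_equiv track=rewrite | github.com/ankitrawat85/QuantStrategies | mathematricks-trader-dev-test/services/dashboard_creator/generators/signal_sender_dashboard.py | _calculate_rejection_reasons
-- ===== SOURCE A (Python) =====
-- from typing import Dict, Any, List
--
-- def _calculate_rejection_reasons(decisions: List[Dict[str, Any]]) -> Dict[str, int]:
--     """Calculate breakdown of rejection reasons"""
--     rejection_counts = {}
--
--     for decision in decisions:
--         if decision.get("decision") != "APPROVED":
--             reason = decision.get("reason", "UNKNOWN")
--
--             # Categorize rejection reasons
--             if "ALLOCATION" in reason or "allocation" in reason:
--                 key = "NO_ALLOCATION"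
--             elif "MARGIN" in reason or "margin" in reason:
--                 key = "MARGIN_EXCEEDED"
--             elif "RISK" in reason or "risk" in reason:
--                 key = "RISK_LIMIT"
--             else:
--                 key = "OTHER"
--
--             rejection_counts[key] = rejection_counts.get(key, 0) + 1
--
--     return rejection_counts
-- ===== SOURCE B (Python) =====
-- from typing import Dict, Any, List
--
-- _REASON_RULES = [
--     ("ALLOCATION", "allocation", "NO_ALLOCATION"),
--     ("MARGIN", "margin", "MARGIN_EXCEEDED"),
--     ("RISK", "risk", "RISK_LIMIT"),
-- ]
--
--
-- def _categorize(reason: str) -> str: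
--     for upper, lower, key in _REASON_RULES:
--         if upper in reason or lower in reason:
--             return key
--     return "OTHER"
--
--
-- def _calculate_rejection_reasons(decisions: List[Dict[str, Any]]) -> Dict[str, int]:
--     """Calculate breakdown of rejection reasons"""
--     # pass 1: categorize every non-approved decision
--     cats = [_categorize(d.get("reason", "UNKNOWN"))
--             for d in decisions if d.get("decision") != "APPROVED"]
--     # pass 2: distinct categories in first-occurrence order, counted via list.count
--     seen = []
--     for k in cats:
--         if k not in seen:
--             seen.append(k)
--     return {k: cats.count(k) for k in seen}
-- ===== Notes on version B (the rewrite author's own statement) =====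
-- stated objective: alternative
-- what changed: Replaces the single-pass if/elif chain with dict-get accumulation by a table-driven categorizer plus a two-pass map/dedup/count construction of the result dict.
import Mathlib
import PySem

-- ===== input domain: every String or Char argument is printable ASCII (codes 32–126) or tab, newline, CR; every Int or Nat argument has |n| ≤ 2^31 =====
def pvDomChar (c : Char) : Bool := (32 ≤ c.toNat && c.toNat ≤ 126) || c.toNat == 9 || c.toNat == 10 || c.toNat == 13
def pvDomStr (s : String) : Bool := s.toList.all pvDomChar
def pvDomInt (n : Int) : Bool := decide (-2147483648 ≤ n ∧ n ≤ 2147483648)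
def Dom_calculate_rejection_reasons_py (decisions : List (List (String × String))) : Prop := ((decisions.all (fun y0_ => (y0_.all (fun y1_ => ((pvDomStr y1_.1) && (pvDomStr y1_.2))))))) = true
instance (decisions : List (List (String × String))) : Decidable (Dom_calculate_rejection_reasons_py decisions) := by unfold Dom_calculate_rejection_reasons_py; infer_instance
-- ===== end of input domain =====

-- B replaces A's if/elif chain and dict-get accumulation by a rule-table categorizer
-- plus a two-pass map / dedup / count construction of the result dict (alternative, not faster).

-- ===== PORT A =====
def calculate_rejection_reasons_py (decisions : List (List (String × String))) : List (String × Int) :=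
  (decisions.foldl
    (fun (rejection_counts : PySem.Dict String Int) (decision : List (String × String)) =>
      if !((PySem.Dict.mk decision).get? "decision" == some "APPROVED") then
        let reason := (PySem.Dict.mk decision).getD "reason" "UNKNOWN"
        let key :=
          if PySem.Str.isIn "ALLOCATION" reason || PySem.Str.isIn "allocation" reason then "NO_ALLOCATION"
          else if PySem.Str.isIn "MARGIN" reason || PySem.Str.isIn "margin" reason then "MARGIN_EXCEEDED"
          else if PySem.Str.isIn "RISK" reason || PySem.Str.isIn "risk" reason then "RISK_LIMIT"
          else "OTHER"
        rejection_counts.insert key (rejection_counts.getD key 0 + 1)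
      else rejection_counts)
    PySem.Dict.empty).items

-- ===== PORT B =====
def pvReasonRules : List (String × String × String) :=
  [("ALLOCATION", "allocation", "NO_ALLOCATION"),
   ("MARGIN", "margin", "MARGIN_EXCEEDED"),
   ("RISK", "risk", "RISK_LIMIT")]

def pvCategorize (rules : List (String × String × String)) (reason : String) : String :=
  match rules with
  | [] => "OTHER"
  | (up, lo, key) :: rest =>
      if PySem.Str.isIn up reason || PySem.Str.isIn lo reason then key
      else pvCategorize rest reason

def calculate_rejection_reasons_py_alt (decisions : List (List (String × String))) : List (String × Int) :=
  let cats :=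
    (decisions.filter (fun d => !((PySem.Dict.mk d).get? "decision" == some "APPROVED"))).map
      (fun d => pvCategorize pvReasonRules ((PySem.Dict.mk d).getD "reason" "UNKNOWN"))
  let seen := cats.foldl (fun (s : List String) k => if s.contains k then s else s ++ [k]) []
  seen.map (fun k => (k, (PySem.List.count cats k : Int)))

-- ===== PRECONDITION & SPEC =====
def Spec_calculate_rejection_reasons_py (decisions : List (List (String × String))) (out : List (String × Int)) : Prop := out = calculate_rejection_reasons_py_alt decisions
instance (decisions : List (List (String × String))) (out : List (String × Int)) : Decidable (Spec_calculate_rejection_reasons_py decisions out) := by unfold Spec_calculate_rejection_reasons_py; infer_instance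

-- ===== CLAIM (what is proved, stated in full; the proofs are below) =====
def Claim_equal_calculate_rejection_reasons_py : Prop := ∀ (decisions : List (List (String × String))), Dom_calculate_rejection_reasons_py decisions → Spec_calculate_rejection_reasons_py decisions (calculate_rejection_reasons_py decisions)

-- ===== LEMMAS AND PROOFS =====

-- a guarded accumulate over l is the plain accumulate over the filtered-and-mapped keys
theorem pv_foldl_if_filter_map {α κ σ : Type} (p : α → Bool) (f : α → κ) (g : σ → κ → σ)
    (l : List α) (init : σ) :
    l.foldl (fun s x => if p x then g s (f x) else s) init
      = ((l.filter p).map f).foldl g init := by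
  induction l generalizing init with
  | nil => rfl
  | cons hd tl ih =>
    by_cases h : p hd = true <;> simp [h, ih]

-- the table lookup over the literal rule list is the nested if/elif chain
theorem pv_categorize_eq (reason : String) :
    pvCategorize pvReasonRules reason
      = (if PySem.Str.isIn "ALLOCATION" reason || PySem.Str.isIn "allocation" reason then "NO_ALLOCATION"
         else if PySem.Str.isIn "MARGIN" reason || PySem.Str.isIn "margin" reason then "MARGIN_EXCEEDED"
         else if PySem.Str.isIn "RISK" reason || PySem.Str.isIn "risk" reason then "RISK_LIMIT"
         else "OTHER") := by
  simp [pvCategorize, pvReasonRules]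

-- ===== VERDICT (by name: the statement is the Claim_ definition above) =====
theorem calculate_rejection_reasons_py_spec : Claim_equal_calculate_rejection_reasons_py := by
  intro decisions _
  unfold Spec_calculate_rejection_reasons_py
  unfold calculate_rejection_reasons_py calculate_rejection_reasons_py_alt
  rw [pv_foldl_if_filter_map
        (fun d => !((PySem.Dict.mk d).get? "decision" == some "APPROVED"))
        (fun d =>
          let reason := (PySem.Dict.mk d).getD "reason" "UNKNOWN"
          if PySem.Str.isIn "ALLOCATION" reason || PySem.Str.isIn "allocation" reason then "NO_ALLOCATION"
          else if PySem.Str.isIn "MARGIN" reason || PySem.Str.isIn "margin" reason then "MARGIN_EXCEEDED"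
          else if PySem.Str.isIn "RISK" reason || PySem.Str.isIn "risk" reason then "RISK_LIMIT"
          else "OTHER")
        (fun (d : PySem.Dict String Int) k => d.insert k (d.getD k 0 + 1))]
  rw [PySem.Dict.foldl_insert_getD_add_one_eq_counter, PySem.Dict.items_counter]
  have hmap : ∀ (l : List (List (String × String))),
      l.map (fun d =>
          let reason := (PySem.Dict.mk d).getD "reason" "UNKNOWN"
          if PySem.Str.isIn "ALLOCATION" reason || PySem.Str.isIn "allocation" reason then "NO_ALLOCATION"
          else if PySem.Str.isIn "MARGIN" reason || PySem.Str.isIn "margin" reason then "MARGIN_EXCEEDED"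
          else if PySem.Str.isIn "RISK" reason || PySem.Str.isIn "risk" reason then "RISK_LIMIT"
          else "OTHER")
        = l.map (fun d => pvCategorize pvReasonRules ((PySem.Dict.mk d).getD "reason" "UNKNOWN")) := by
    intro l; exact List.map_congr_left (fun d _ => (pv_categorize_eq _).symm)
  rw [hmap]
  have hseen : ∀ (cats : List String),
      cats.foldl (fun (s : List String) k => if s.contains k then s else s ++ [k]) []
        = PySem.Set.ofList cats := by
    intro cats
    rw [PySem.Set.ofList_eq_foldl]
    rfl
  simp only [hseen, PySem.List.count_eq]
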